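-- pv_equiv track=rewrite | github.com/Inveterate-Enthusiast/LeetCode | Python/22. Generate Parentheses.py | generatePermutation1
-- ===== SOURCE A (Python) =====
-- def generatePermutation1(lst: list) -> list[str]:
--     if len(lst) < 2:
--         return lst
--     OurFac = 1
--     for i in range(2, len(lst) + 1):
--         OurFac *= i
--     OurResult = [[None for _ in range(len(lst))] for _ in range(OurFac)]
--     for indexDigit in range(len(lst)):
--         t = OurFac // len(lst)
--         i = indexDigit; j = 0
--         for index in range(len(OurResult)):
--             if t == 0:
--                 t = OurFac // len(lst)
--                 j += 1
--                 i = (indexDigit + j)%len(lst)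
--             OurResult[index][i] = lst[indexDigit]
--             t -= 1
--
--     return OurResult
-- ===== SOURCE B (Python) =====
-- def generatePermutation1(lst: list) -> list[str]:
--     n = len(lst)
--     if n < 2:
--         return lst
--     block = 1
--     for k in range(2, n):
--         block *= k          # (n-1)!
--     out = []
--     rot = list(lst)
--     for _ in range(n):
--         for _ in range(block):
--             out.append(rot)
--         rot = rot[-1:] + rot[:-1]
--     return out
-- ===== Notes on version B (the rewrite author's own statement) =====
-- stated objective: simpler
-- what changed: Instead of A's counter-driven column-wise fill of a preallocated n!-by-n grid, B builds the n distinct rows incrementally by rotating the list (moving its last element to the front) and emits (n-1)! copies of each rotation, with no grid, no counters and no modular index arithmetic.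
-- outside the precondition, e.g. on generatePermutation1(['q']): A returns ['q'], B returns ['q']
import Mathlib
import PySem

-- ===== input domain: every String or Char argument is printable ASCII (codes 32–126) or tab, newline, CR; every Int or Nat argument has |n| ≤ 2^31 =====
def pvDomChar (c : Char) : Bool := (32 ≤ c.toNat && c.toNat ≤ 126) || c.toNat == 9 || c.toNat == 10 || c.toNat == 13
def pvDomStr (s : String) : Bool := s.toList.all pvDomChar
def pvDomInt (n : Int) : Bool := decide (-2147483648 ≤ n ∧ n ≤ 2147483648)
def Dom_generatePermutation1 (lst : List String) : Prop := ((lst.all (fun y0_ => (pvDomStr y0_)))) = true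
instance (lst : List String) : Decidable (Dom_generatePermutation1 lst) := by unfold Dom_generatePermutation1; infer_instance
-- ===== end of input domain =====

-- B drops A's counter-driven column-wise fill of a preallocated grid and instead builds the n
-- rotations incrementally (last element to the front), emitting (n-1)! copies of each; same cost.

-- ===== PORT A =====
-- Helper: the body of A's inner 'for index in range(len(OurResult))' loop, on state (OurResult, t, i, j).
def pvInnerStepA (fac nI indexDigit : Int) (lst : List String)
    (st : List (List String) × Int × Int × Int) (index : Int) :
    List (List String) × Int × Int × Int :=
  match st with
  | (g, t, i, j) =>
    let tij := if t = 0
      then (PySem.Int.floordiv fac nI, PySem.Int.mod (indexDigit + (j + 1)) nI, j + 1)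
      else (t, i, j)
    (PySem.List.pySetD g index
       (PySem.List.pySetD (PySem.List.pyGetD g index []) tij.2.1
          (PySem.List.pyGetD lst indexDigit "")),
     tij.1 - 1, tij.2.1, tij.2.2)

-- Python's 'None' placeholder cells are represented by ""; every cell is overwritten before return.
-- For len(lst) < 2 Python returns lst itself (a list of strings): only [] reaches this under Pre_,
-- where '[]' and 'lst.map (fun s => [s])' coincide.
def generatePermutation1 (lst : List String) : List (List String) :=
  if lst.length < 2 then lst.map (fun s => [s])
  else
    let fac : Int := (PySem.List.pyRange 2 ((lst.length : Int) + 1) 1).foldl (fun a i => a * i) 1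
    let grid0 : List (List String) :=
      (List.range fac.toNat).map (fun _ => (List.range lst.length).map (fun _ => ""))
    (PySem.List.pyRange 0 (lst.length : Int) 1).foldl
      (fun g indexDigit =>
        ((PySem.List.pyRange 0 (g.length : Int) 1).foldl
          (pvInnerStepA fac (lst.length : Int) indexDigit lst)
          (g, PySem.Int.floordiv fac (lst.length : Int), indexDigit, 0)).1)
      grid0

-- ===== PORT B =====
-- Transliteration of Source B: block = (n-1)! by the product 2..n-1; then n outer passes, each
-- appending block copies of rot and then rotating rot by rot[-1:] + rot[:-1].
def generatePermutation1_alt (lst : List String) : List (List String) :=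
  if lst.length < 2 then lst.map (fun s => [s])
  else
    let block : Int := (PySem.List.pyRange 2 (lst.length : Int) 1).foldl (fun a k => a * k) 1
    ((PySem.List.pyRange 0 (lst.length : Int) 1).foldl
      (fun (st : List (List String) × List String) _ =>
        ((PySem.List.pyRange 0 block 1).foldl (fun o _ => o ++ [st.2]) st.1,
         PySem.List.slice st.2 (some (-1)) none ++ PySem.List.slice st.2 none (some (-1))))
      ([], lst)).1

-- ===== PRECONDITION & SPEC =====
-- Pre_ excludes exactly the singleton lists: there Python A returns the input list of strings itself,
-- which is not a value of the declared list-of-lists return type.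
def Pre_generatePermutation1 (lst : List String) : Prop := lst.length ≠ 1
instance (lst : List String) : Decidable (Pre_generatePermutation1 lst) := by
  unfold Pre_generatePermutation1; infer_instance
def pvWitness_generatePermutation1 : List String := ["a", "b"]

def Spec_generatePermutation1 (lst : List String) (out : List (List String)) : Prop :=
  out = generatePermutation1_alt lst
instance (lst : List String) (out : List (List String)) : Decidable (Spec_generatePermutation1 lst out) := by
  unfold Spec_generatePermutation1; infer_instance

-- ===== CLAIM (what is proved, stated in full; the proofs are below) =====
def Claim_equal_generatePermutation1 : Prop :=
  ∀ (lst : List String), Dom_generatePermutation1 lst → Pre_generatePermutation1 lst →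
    Spec_generatePermutation1 lst (generatePermutation1 lst)

-- ===== LEMMAS AND PROOFS =====

lemma pv_mod_small (x n : Nat) (h : x < 2*n) : x % n = if x < n then x else x - n := by
  split
  · exact Nat.mod_eq_of_lt ‹_›
  · rw [Nat.mod_eq_sub_mod (by omega), Nat.mod_eq_of_lt (by omega)]

lemma pv_fac_eq (n : Nat) (h : 1 ≤ n) :
    (PySem.List.pyRange 2 ((n : Int) + 1) 1).foldl (fun a i => a * i) 1 = (n.factorial : Int) := by
  induction n, h using Nat.le_induction with
  | base =>
    rw [PySem.List.pyRange_one_eq_nil (by norm_num)]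
    simp [Nat.factorial]
  | succ n hn ih =>
    have h1 : ((n + 1 : Nat) : Int) + 1 = ((n : Int) + 1) + 1 := by push_cast; ring
    rw [h1, PySem.List.pyRange_one_succ_right (by omega),
      List.foldl_append, ih]
    simp [Nat.factorial_succ]
    ring

lemma pv_rot_bij (n q m c : Nat) (hn : 0 < n) (hm : m < n) (hc : c < n) :
    (m + q) % n = c ↔ (c + n - q % n) % n = m := by
  have hb : q % n < n := Nat.mod_lt _ hn
  have h1 : (m + q) % n = (m + q % n) % n := by
    conv_lhs => rw [Nat.add_mod]
    rw [Nat.mod_eq_of_lt hm]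
  rw [h1, pv_mod_small (m + q % n) n (by omega), pv_mod_small (c + n - q % n) n (by omega)]
  split_ifs <;> omega

lemma pv_succ_cycle (B k : Nat) (hB : 1 ≤ B) :
    ((k + 1) % B = if k % B = B - 1 then 0 else k % B + 1)
  ∧ ((k + 1) / B = if k % B = B - 1 then k / B + 1 else k / B) := by
  have hk : k % B < B := Nat.mod_lt _ (by omega)
  have hmod : (k + 1) % B = if k % B = B - 1 then 0 else k % B + 1 := by
    rcases Nat.lt_or_ge 1 B with h2 | h1
    · conv_lhs => rw [Nat.add_mod]
      rw [Nat.mod_eq_of_lt h2]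
      split_ifs with hres
      · rw [hres, Nat.sub_add_cancel (by omega), Nat.mod_self]
      · exact Nat.mod_eq_of_lt (by omega)
    · have hB1 : B = 1 := by omega
      subst hB1; simp [Nat.mod_one]
  have hdvd : B ∣ (k + 1) ↔ k % B = B - 1 := by
    constructor
    · intro hx
      have h0 : (k + 1) % B = 0 := Nat.dvd_iff_mod_eq_zero.mp hx
      rw [hmod] at h0
      split_ifs at h0 with h
      exact h
    · intro hx
      apply Nat.dvd_of_mod_eq_zero
      rw [hmod, if_pos hx]
  refine ⟨hmod, ?_⟩
  rw [Nat.succ_div]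
  simp only [hdvd]
  split_ifs with hres
  · rfl
  · simp

def pvUpd (pos : Nat → Nat) (v : String) : Nat → Nat → List (List String) → List (List String)
  | _, 0, g => g
  | k, m + 1, g => pvUpd pos v (k + 1) m (g.set k ((g.getD k []).set (pos k) v))

lemma pvUpd_length (pos : Nat → Nat) (v : String) (m : Nat) :
    ∀ (k : Nat) (g : List (List String)), (pvUpd pos v k m g).length = g.length := by
  induction m with
  | zero => intro k g; rfl
  | succ m ih => intro k g; rw [pvUpd, ih]; simp

lemma pv_getD_set (g : List (List String)) (k r : Nat) (x : List String) (hr : r < g.length) :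
    (g.set k x).getD r [] = if r = k ∧ k < g.length then x else g.getD r [] := by
  rcases Decidable.em (r = k) with h | h
  · subst h
    rw [if_pos ⟨rfl, hr⟩]
    rw [List.getD_eq_getElem _ _ (by simpa using hr), List.getElem_set_self (by simpa using hr)]
  · rw [if_neg (fun hx => h hx.1)]
    rw [List.getD_eq_getElem _ _ (by simpa using hr), List.getD_eq_getElem _ _ hr,
      List.getElem_set_ne (by omega)]

lemma pvUpd_getD (pos : Nat → Nat) (v : String) (m : Nat) :
    ∀ (k r : Nat) (g : List (List String)), r < g.length →
    (pvUpd pos v k m g).getD r [] =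
      if k ≤ r ∧ r < k + m then (g.getD r []).set (pos r) v else g.getD r [] := by
  induction m with
  | zero => intro k r g hr; rw [if_neg (by omega)]; rfl
  | succ m ih =>
    intro k r g hr
    by_cases h : r = k
    · rw [pvUpd, ih (k+1) r _ (by simpa using hr),
        if_neg (show ¬((k+1 ≤ r) ∧ r < k+1+m) from by omega),
        pv_getD_set _ _ _ _ hr, if_pos ⟨h, by omega⟩,
        if_pos (show k ≤ r ∧ r < k + (m+1) from by omega), h]
    · rw [pvUpd, ih (k+1) r _ (by simpa using hr), pv_getD_set _ _ _ _ hr,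
        if_neg (show ¬(r = k ∧ k < g.length) from fun hx => h hx.1)]
      split_ifs with h1 h2 <;> first | rfl | omega

lemma pv_row_fold_len (n q : Nat) (lst : List String) (m : Nat) (row : List String) :
    ((List.range m).foldl (fun row d => row.set ((d + q) % n) (lst.getD d "")) row).length
      = row.length := by
  induction m generalizing row with
  | zero => rfl
  | succ m ih => rw [List.range_succ, List.foldl_append, List.foldl_cons, List.foldl_nil, List.length_set, ih]

lemma pv_row_fold (lst : List String) (n q : Nat) (hn : 0 < n) (m : Nat) (hm : m ≤ n) :
    ∀ (c : Nat), c < n → ∀ (row : List String), row.length = n →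
    ((List.range m).foldl (fun row d => row.set ((d + q) % n) (lst.getD d "")) row).getD c "" =
      if (c + n - q % n) % n < m then lst.getD ((c + n - q % n) % n) "" else row.getD c "" := by
  induction m with
  | zero => intro c hc row hrow; rw [if_neg (by omega)]; rfl
  | succ m ih =>
    intro c hc row hrow
    rw [List.range_succ, List.foldl_append, List.foldl_cons, List.foldl_nil]
    have hlen : ((List.range m).foldl (fun row d => row.set ((d + q) % n) (lst.getD d "")) row).length = n := by
      rw [pv_row_fold_len]; exact hrow
    rw [List.getD_eq_getElem _ _ (by rw [List.length_set, hlen]; exact hc), List.getElem_set]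
    by_cases h : (m + q) % n = c
    · -- this step writes column c; by pv_rot_bij its source index is m
      have hd : (c + n - q % n) % n = m := (pv_rot_bij n q m c hn (by omega) hc).mp h
      rw [if_pos h, if_pos (by omega), hd]
    · have hd : (c + n - q % n) % n ≠ m := fun hx => h ((pv_rot_bij n q m c hn (by omega) hc).mpr hx)
      rw [if_neg h, ← List.getD_eq_getElem _ "" (by rw [hlen]; exact hc),
        ih (by omega) c hc row hrow]
      split_ifs with h1 h2 <;> first | rfl | omega

lemma pv_inner_go (n d B F : Nat) (hd : d < n) (hB : 1 ≤ B)
    (hBF : PySem.Int.floordiv (F : Int) (n : Int) = (B : Int)) (lst : List String) (m : Nat) :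
    ∀ (k : Nat) (g : List (List String)), k + m = F →
    (PySem.List.pyRange (k : Int) (F : Int) 1).foldl
        (pvInnerStepA (F : Int) (n : Int) (d : Int) lst)
        (g,
         (if k = 0 then (B : Int) else (B : Int) - 1 - (((k - 1) % B : Nat) : Int)),
         (if k = 0 then (d : Int) else (((d + (k - 1) / B) % n : Nat) : Int)),
         (if k = 0 then (0 : Int) else (((k - 1) / B : Nat) : Int)))
      = (pvUpd (fun r => (d + r / B) % n) (lst.getD d "") k m g,
         (if F = 0 then (B : Int) else (B : Int) - 1 - (((F - 1) % B : Nat) : Int)),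
         (if F = 0 then (d : Int) else (((d + (F - 1) / B) % n : Nat) : Int)),
         (if F = 0 then (0 : Int) else (((F - 1) / B : Nat) : Int))) := by
  induction m with
  | zero =>
    intro k g hk
    have hkF : k = F := by omega
    subst hkF
    rw [PySem.List.pyRange_one_eq_nil (le_refl _), List.foldl_nil, pvUpd]
  | succ m ih =>
    intro k g hk
    rw [PySem.List.pyRange_one_cons (by exact_mod_cast (show k < F by omega)), List.foldl_cons]
    have hstep : pvInnerStepA (F : Int) (n : Int) (d : Int) lst
        (g,
         (if k = 0 then (B : Int) else (B : Int) - 1 - (((k - 1) % B : Nat) : Int)),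
         (if k = 0 then (d : Int) else (((d + (k - 1) / B) % n : Nat) : Int)),
         (if k = 0 then (0 : Int) else (((k - 1) / B : Nat) : Int))) (k : Int)
      = (g.set k ((g.getD k []).set ((d + k / B) % n) (lst.getD d "")),
         (B : Int) - 1 - ((k % B : Nat) : Int),
         (((d + k / B) % n : Nat) : Int),
         ((k / B : Nat) : Int)) := by
      by_cases hk0 : k = 0
      · subst hk0
        rw [if_pos rfl, if_pos rfl, if_pos rfl]
        simp only [pvInnerStepA]
        rw [if_neg (show ¬((B : Int) = 0) by exact_mod_cast (by omega : B ≠ 0))]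
        simp [Nat.mod_eq_of_lt hd, PySem.List.pyGetD_zero, PySem.List.pySetD_of_nonneg]
      · obtain ⟨p, rfl⟩ : ∃ p, k = p + 1 := ⟨k - 1, by omega⟩
        have hcyc := pv_succ_cycle B p hB
        rw [if_neg (Nat.succ_ne_zero p), if_neg (Nat.succ_ne_zero p), if_neg (Nat.succ_ne_zero p)]
        simp only [Nat.add_sub_cancel]
        simp only [pvInnerStepA]
        by_cases hres : p % B = B - 1
        · have hc1 : (p + 1) % B = 0 := by rw [hcyc.1, if_pos hres]
          have hc2 : (p + 1) / B = p / B + 1 := by rw [hcyc.2, if_pos hres]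
          rw [if_pos (show (B : Int) - 1 - ((p % B : Nat) : Int) = 0 by
            rw [hres]; push_cast [Nat.cast_sub hB]; ring)]
          have hmodeq : PySem.Int.mod ((d : Int) + (((p / B : Nat) : Int) + 1)) (n : Int)
              = (((d + (p + 1) / B) % n : Nat) : Int) := by
            rw [show ((d : Int) + (((p / B : Nat) : Int) + 1)) = ((d + (p + 1) / B : Nat) : Int) by
              rw [hc2]; push_cast; ring, PySem.Int.mod_natCast]
          refine Prod.ext ?_ (Prod.ext ?_ (Prod.ext ?_ ?_))
          · rw [hmodeq, PySem.List.pyGetD_natCast, PySem.List.pyGetD_natCast,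
              PySem.List.pySetD_natCast, PySem.List.pySetD_natCast]
          · rw [hBF, hc1]; norm_num
          · exact hmodeq
          · rw [hc2]; push_cast; ring
        · have hc1 : (p + 1) % B = p % B + 1 := by rw [hcyc.1, if_neg hres]
          have hc2 : (p + 1) / B = p / B := by rw [hcyc.2, if_neg hres]
          have hpk : p % B < B := Nat.mod_lt _ (by omega)
          rw [if_neg (show ¬((B : Int) - 1 - ((p % B : Nat) : Int) = 0) by intro heq; omega)]
          refine Prod.ext ?_ (Prod.ext ?_ (Prod.ext ?_ ?_))
          · rw [hc2, PySem.List.pyGetD_natCast, PySem.List.pyGetD_natCast,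
              PySem.List.pySetD_natCast, PySem.List.pySetD_natCast]
          · rw [hc1]; push_cast; ring
          · rw [hc2]
          · rw [hc2]
    rw [hstep]
    have hc1 : ((k + 1 : Nat) : Int) = (k : Int) + 1 := by push_cast; ring
    have htail := ih (k + 1) (g.set k ((g.getD k []).set ((d + k / B) % n) (lst.getD d ""))) (by omega)
    rw [if_neg (Nat.succ_ne_zero k), if_neg (Nat.succ_ne_zero k), if_neg (Nat.succ_ne_zero k),
      Nat.add_sub_cancel, hc1] at htail
    rw [htail]
    conv_rhs => rw [pvUpd]

def pvSpecGrid (lst : List String) : List (List String) :=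
  (List.range lst.length.factorial).map (fun r =>
    (List.range lst.length).map (fun c =>
      lst.getD ((c + lst.length - (r / (lst.length.factorial / lst.length)) % lst.length) % lst.length) ""))

lemma pv_outer (lst : List String) (n B F : Nat) (hB : 1 ≤ B)
    (hBF : PySem.Int.floordiv (F : Int) (n : Int) = (B : Int)) :
    ∀ (ds : List Nat) (g : List (List String)), (∀ x ∈ ds, x < n) → g.length = F →
    ds.foldl (fun g k =>
        ((PySem.List.pyRange 0 ((g.length : Nat) : Int) 1).foldl
          (pvInnerStepA (F : Int) (n : Int) ((k : Nat) : Int) lst)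
          (g, PySem.Int.floordiv (F : Int) (n : Int), ((k : Nat) : Int), 0)).1) g
      = ds.foldl (fun g d => pvUpd (fun r => (d + r / B) % n) (lst.getD d "") 0 F g) g := by
  intro ds
  induction ds with
  | nil => intro g _ _; rfl
  | cons x ds ih =>
    intro g hmem hlen
    rw [List.foldl_cons, List.foldl_cons]
    have hgo := pv_inner_go n x B F (hmem x (by simp)) hB hBF lst F 0 g (by omega)
    rw [if_pos rfl, if_pos rfl, if_pos rfl, Nat.cast_zero] at hgo
    have h1 : ((PySem.List.pyRange 0 ((g.length : Nat) : Int) 1).foldl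
          (pvInnerStepA (F : Int) (n : Int) (x : Int) lst)
          (g, PySem.Int.floordiv (F : Int) (n : Int), (x : Int), 0)).1
        = pvUpd (fun r => (x + r / B) % n) (lst.getD x "") 0 F g := by
      rw [hlen, hBF, hgo]
    rw [h1]
    exact ih _ (fun y hy => hmem y (by simp [hy])) (by rw [pvUpd_length]; exact hlen)

lemma pv_upds_length (n B F : Nat) (lst : List String) :
    ∀ (ds : List Nat) (g : List (List String)),
    (ds.foldl (fun g d => pvUpd (fun r => (d + r / B) % n) (lst.getD d "") 0 F g) g).length
      = g.length := by
  intro ds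
  induction ds with
  | nil => intro g; rfl
  | cons x ds ih => intro g; rw [List.foldl_cons, ih, pvUpd_length]

lemma pv_rows (n B F : Nat) (lst : List String) :
    ∀ (ds : List Nat) (g : List (List String)) (r : Nat), r < g.length → g.length = F →
    (ds.foldl (fun g d => pvUpd (fun r => (d + r / B) % n) (lst.getD d "") 0 F g) g).getD r []
      = ds.foldl (fun row d => row.set ((d + r / B) % n) (lst.getD d "")) (g.getD r []) := by
  intro ds
  induction ds with
  | nil => intro g r _ _; rfl
  | cons x ds ih =>
    intro g r hr hlen
    rw [List.foldl_cons, List.foldl_cons,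
      ih _ r (by rw [pvUpd_length]; exact hr) (by rw [pvUpd_length]; exact hlen),
      pvUpd_getD _ _ _ _ _ _ hr, if_pos (by omega)]

lemma pv_a_eq_spec (lst : List String) (h2 : 2 ≤ lst.length) :
    generatePermutation1 lst = pvSpecGrid lst := by
  have hn : 0 < lst.length := by omega
  have hFn : lst.length ≤ lst.length.factorial := Nat.self_le_factorial _
  have hB : 1 ≤ lst.length.factorial / lst.length := (Nat.one_le_div_iff hn).mpr hFn
  have hBF : PySem.Int.floordiv ((lst.length.factorial : Nat) : Int) ((lst.length : Nat) : Int)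
      = ((lst.length.factorial / lst.length : Nat) : Int) := PySem.Int.floordiv_natCast _ _
  unfold generatePermutation1
  rw [if_neg (by omega)]
  simp only [pv_fac_eq lst.length (by omega), Int.toNat_natCast]
  rw [PySem.List.pyRange_zero_nat lst.length]
  simp only [List.foldl_map]
  rw [pv_outer lst lst.length (lst.length.factorial / lst.length) lst.length.factorial hB hBF
    (List.range lst.length) _ (fun x hx => List.mem_range.mp hx) (by simp)]
  have hglen : ((List.range lst.length.factorial).map
      (fun _ => (List.range lst.length).map (fun _ => ""))).length = lst.length.factorial := by simp
  apply List.ext_getElem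
  · rw [pv_upds_length]
    simp [pvSpecGrid]
  · intro r h1 h2'
    have hrF : r < lst.length.factorial := by
      rw [pv_upds_length, hglen] at h1; exact h1
    rw [← List.getD_eq_getElem _ [] h1,
      pv_rows lst.length (lst.length.factorial / lst.length) lst.length.factorial lst
        (List.range lst.length) _ r (by rw [hglen]; exact hrF) hglen,
      PySem.List.getD_map_range _ _ _ _ hrF]
    -- row-level equality
    have hrowlen : ((List.range lst.length).map (fun _ => "")).length = lst.length := by simp
    apply List.ext_getElem
    · rw [pv_row_fold_len]
      simp [pvSpecGrid]
    · intro c hc1 hc2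
      have hcn : c < lst.length := by
        rw [pv_row_fold_len, hrowlen] at hc1; exact hc1
      rw [← List.getD_eq_getElem _ "" hc1,
        pv_row_fold lst lst.length (r / (lst.length.factorial / lst.length)) hn lst.length
          (le_refl _) c hcn _ hrowlen,
        if_pos (Nat.mod_lt _ hn)]
      simp [pvSpecGrid, List.getElem_map]

-- ===== B-side lemmas =====

-- row b of the result: lst rotated right by b
def pvRowB (lst : List String) (b : Nat) : List String :=
  (List.range lst.length).map (fun c =>
    lst.getD ((c + lst.length - b % lst.length) % lst.length) "")

lemma pv_rowB_zero (lst : List String) : pvRowB lst 0 = lst := by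
  unfold pvRowB
  apply List.ext_getElem
  · simp
  · intro c h1 h2
    have hc : c < lst.length := by simpa using h1
    simp only [List.getElem_map, List.getElem_range]
    rw [Nat.zero_mod, Nat.sub_zero, Nat.add_mod_right, Nat.mod_eq_of_lt hc,
      List.getD_eq_getElem _ _ hc]

lemma pv_idx_head (n b : Nat) (hn : 0 < n) :
    (0 + n - (b + 1) % n) % n = (n - 1 + n - b % n) % n := by
  have hm : b % n < n := Nat.mod_lt _ hn
  rw [(pv_succ_cycle n b hn).1]
  by_cases h : b % n = n - 1
  · rw [if_pos h, h]
    rw [pv_mod_small (0 + n - 0) n (by omega), pv_mod_small (n - 1 + n - (n - 1)) n (by omega)]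
    split_ifs <;> omega
  · rw [if_neg h]
    rw [pv_mod_small (0 + n - (b % n + 1)) n (by omega),
      pv_mod_small (n - 1 + n - b % n) n (by omega)]
    split_ifs <;> omega

lemma pv_idx_tail (n b c : Nat) (hn : 0 < n) (hc : c + 1 < n) :
    (c + 1 + n - (b + 1) % n) % n = (c + n - b % n) % n := by
  have hm : b % n < n := Nat.mod_lt _ hn
  rw [(pv_succ_cycle n b hn).1]
  by_cases h : b % n = n - 1
  · rw [if_pos h, h]
    rw [pv_mod_small (c + 1 + n - 0) n (by omega), pv_mod_small (c + n - (n - 1)) n (by omega)]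
    split_ifs <;> omega
  · rw [if_neg h]
    congr 1
    omega

-- the port's rotation step sends row b to row b+1
lemma pv_rotR_rowB (lst : List String) (b : Nat) (hn : 0 < lst.length) :
    (pvRowB lst b).drop ((pvRowB lst b).length - 1) ++ (pvRowB lst b).dropLast
      = pvRowB lst (b + 1) := by
  obtain ⟨m, hm⟩ : ∃ m, lst.length = m + 1 := ⟨lst.length - 1, by omega⟩
  have hlen : (pvRowB lst b).length = m + 1 := by simp [pvRowB, hm]
  have hrow : pvRowB lst b
      = (List.range m).map (fun c =>
          lst.getD ((c + lst.length - b % lst.length) % lst.length) "")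
        ++ [lst.getD ((m + lst.length - b % lst.length) % lst.length) ""] := by
    unfold pvRowB
    rw [hm, List.range_succ, List.map_append, List.map_cons, List.map_nil]
  rw [hlen, Nat.add_sub_cancel, hrow,
    List.drop_left' (by simp), List.dropLast_concat, List.singleton_append]
  conv_rhs => unfold pvRowB
  rw [hm, List.range_succ_eq_map, List.map_cons, List.map_map]
  congr 1
  · refine congrArg (fun i => lst.getD i "") ?_
    have h := pv_idx_head (m + 1) b (by omega)
    rw [Nat.add_sub_cancel] at h
    exact h.symm
  · apply List.map_congr_left
    intro c hc
    have hcn : c + 1 < m + 1 := Nat.succ_lt_succ (List.mem_range.mp hc)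
    simp only [Function.comp_apply, Nat.succ_eq_add_one]
    rw [pv_idx_tail (m + 1) b c (by omega) hcn]

-- appending one element per loop turn = append replicate
lemma pv_rep_fold (rot : List String) (ys : List Int) :
    ∀ (out : List (List String)),
    ys.foldl (fun o _ => o ++ [rot]) out = out ++ List.replicate ys.length rot := by
  induction ys with
  | nil => intro out; simp
  | cons y ys ih =>
    intro out
    rw [List.foldl_cons, ih]
    simp [List.replicate_succ]

-- the whole outer loop in closed form
lemma pv_outer_B (lst : List String) (hn : 0 < lst.length) (B : Nat) (m : Nat) :
    (List.range m).foldl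
      (fun (st : List (List String) × List String) (_ : Nat) =>
        (st.1 ++ List.replicate B st.2,
         st.2.drop (st.2.length - 1) ++ st.2.dropLast))
      ([], lst)
    = ((List.range m).flatMap (fun b => List.replicate B (pvRowB lst b)), pvRowB lst m) := by
  induction m with
  | zero =>
    rw [List.range_zero, List.foldl_nil, List.flatMap_nil, pv_rowB_zero]
  | succ m ih =>
    rw [List.range_succ, List.foldl_append, ih, List.foldl_cons, List.foldl_nil,
      List.flatMap_append, List.flatMap_cons, List.flatMap_nil, List.append_nil,
      pv_rotR_rowB lst m hn]

lemma pv_range_mul (lst : List String) (B : Nat) (hB : 0 < B) (a : Nat) :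
    (List.range (a * B)).map (fun r => pvRowB lst (r / B))
      = (List.range a).flatMap (fun b => List.replicate B (pvRowB lst b)) := by
  induction a with
  | zero => simp
  | succ a ih =>
    rw [Nat.succ_mul, List.range_add, List.map_append, ih,
      List.range_succ, List.flatMap_append, List.flatMap_cons, List.flatMap_nil, List.append_nil]
    refine congrArg _ ?_
    rw [List.map_map]
    have h1 : ∀ s ∈ List.range B, (a * B + s) / B = a := by
      intro s hs
      rw [Nat.mul_comm a B, Nat.mul_add_div hB, Nat.div_eq_of_lt (List.mem_range.mp hs)]
      omega
    calc (List.range B).map (fun s => pvRowB lst ((a * B + s) / B))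
        = (List.range B).map (fun _ => pvRowB lst a) := by
          apply List.map_congr_left; intro s hs
          rw [h1 s hs]
      _ = List.replicate B (pvRowB lst a) := by
          rw [List.map_const']; simp

lemma pv_alt_eq_spec (lst : List String) (h2 : 2 ≤ lst.length) :
    generatePermutation1_alt lst = pvSpecGrid lst := by
  have hn : 0 < lst.length := by omega
  have hBpos : 0 < (lst.length - 1).factorial := Nat.factorial_pos _
  unfold generatePermutation1_alt
  rw [if_neg (by omega)]
  have hfac : (PySem.List.pyRange 2 ((lst.length : Int)) 1).foldl (fun a k => a * k) 1
      = (((lst.length - 1).factorial : Nat) : Int) := by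
    rw [show ((lst.length : Nat) : Int) = ((lst.length - 1 : Nat) : Int) + 1 by omega]
    exact pv_fac_eq (lst.length - 1) (by omega)
  simp only [hfac]
  rw [PySem.List.pyRange_zero_nat lst.length]
  simp only [List.foldl_map]
  have hstep : (fun (st : List (List String) × List String) (_ : Nat) =>
        ((PySem.List.pyRange 0 (((lst.length - 1).factorial : Nat) : Int) 1).foldl
            (fun o _ => o ++ [st.2]) st.1,
         PySem.List.slice st.2 (some (-1)) none ++ PySem.List.slice st.2 none (some (-1))))
      = (fun (st : List (List String) × List String) (_ : Nat) =>
        (st.1 ++ List.replicate ((lst.length - 1).factorial) st.2,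
         st.2.drop (st.2.length - 1) ++ st.2.dropLast)) := by
    funext st x
    rw [pv_rep_fold, PySem.List.pyRange_zero_nat, List.length_map, List.length_range,
      PySem.List.slice_from_neg_one, PySem.List.slice_to_neg_one]
  rw [hstep, pv_outer_B lst hn _ lst.length]
  have hquot : lst.length.factorial / lst.length = (lst.length - 1).factorial := by
    conv_lhs => rw [← Nat.mul_factorial_pred (by omega : lst.length ≠ 0)]
    exact Nat.mul_div_cancel_left _ hn
  have hmul : lst.length.factorial = lst.length * (lst.length - 1).factorial := by
    rw [← Nat.mul_factorial_pred (by omega : lst.length ≠ 0)]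
  show _ = pvSpecGrid lst
  unfold pvSpecGrid
  rw [hquot, hmul, ← pv_range_mul lst ((lst.length - 1).factorial) hBpos lst.length]
  apply List.map_congr_left
  intro r _
  rfl

-- ===== VERDICT (by name: the statement is the Claim_ definition above) =====
theorem generatePermutation1_spec : Claim_equal_generatePermutation1 := by
  intro lst _ _
  unfold Spec_generatePermutation1
  by_cases h : lst.length < 2
  · unfold generatePermutation1 generatePermutation1_alt
    rw [if_pos h, if_pos h]
  · rw [pv_a_eq_spec lst (by omega), pv_alt_eq_spec lst (by omega)]
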